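-- pv_equiv track=rewrite | github.com/2HyeokJun/coding_test_repo | 백준/Silver/8933. MCS/MCS.py | solution
-- ===== SOURCE A (Python) =====
-- def _dict_to_str(dict):
--     string = ""
--     for key, value in dict.items():
--         string += f"{key}{str(value)}"
--     return string
--
-- def _counter(current_counter, plus_char, minus_char):
--     current_counter[plus_char] += 1
--     if minus_char is not None:
--         current_counter[minus_char]-= 1
--
--     counter_str = _dict_to_str(current_counter)
--
--     return current_counter, counter_str
--
-- def solution(k, w):
--     answer = 1
--     answer_dict = {}
--     counter_dict = {
--         "A": 0,
--         "C": 0,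
--         "G": 0,
--         "T": 0
--     }
--     for i in range(k):
--         counter_dict[w[i]] += 1
--     default_str = _dict_to_str(counter_dict)
--     answer_dict[default_str] = 1
--
--     for i in range(k, len(w)):
--         plus_char = w[i]
--         minus_char = w[i - k]
--         counter_dict, string = _counter(counter_dict, plus_char, minus_char)
--         count = answer_dict.get(string, 0) + 1
--         answer_dict[string] = count
--         answer = max(count, answer)
--
--
--     return answer
-- ===== SOURCE B (Python) =====
-- def solution(k, w):
--     n = len(w)
--     # prefix[i] = counts of A, C, G, T in w[:i]
--     counts = {"A": 0, "C": 0, "G": 0, "T": 0}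
--     prefix = [(0, 0, 0, 0)]
--     for ch in w:
--         counts[ch] += 1
--         prefix.append((counts["A"], counts["C"], counts["G"], counts["T"]))
--     freq = {}
--     best = 1
--     for s in range(n - k + 1):
--         pa, pc, pg, pt = prefix[s + k]
--         qa, qc, qg, qt = prefix[s]
--         key = f"A{pa - qa}C{pc - qc}G{pg - qg}T{pt - qt}"
--         cnt = freq.get(key, 0) + 1
--         freq[key] = cnt
--         best = max(best, cnt)
--     return best
-- ===== Notes on version B (the rewrite author's own statement) =====
-- stated objective: alternative
-- what changed: B replaces A's mutable sliding counter dict (updated with +1/-1 per step and re-serialized by iterating the dict) with a precomputed immutable prefix-count table; each window signature is formed from componentwise prefix differences and tallied in one pass over window starts.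
import Mathlib
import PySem

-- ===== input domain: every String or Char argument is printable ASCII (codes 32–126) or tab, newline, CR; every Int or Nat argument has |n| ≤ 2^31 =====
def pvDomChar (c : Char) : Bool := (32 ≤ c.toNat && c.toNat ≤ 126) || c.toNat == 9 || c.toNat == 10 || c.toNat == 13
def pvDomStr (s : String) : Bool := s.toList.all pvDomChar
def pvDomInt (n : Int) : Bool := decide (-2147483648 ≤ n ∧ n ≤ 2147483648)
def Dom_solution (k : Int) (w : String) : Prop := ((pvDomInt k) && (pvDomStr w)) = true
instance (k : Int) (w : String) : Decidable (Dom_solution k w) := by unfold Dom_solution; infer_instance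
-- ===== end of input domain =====

set_option maxRecDepth 8192

-- A and B compute the same value on the stated domain; B swaps A's mutable sliding
-- counter dict (and its per-step re-serialization) for a precomputed prefix-count
-- table whose componentwise differences give each window's signature (alternative
-- decomposition; no speed claim).

-- ===== PORT A =====
-- _dict_to_str: concatenates f"{key}{value}" over the dict items (string as List Char)
def pvDictToStr (d : PySem.Dict Char Int) : List Char :=
  d.items.foldl (fun s kv => s ++ ([kv.1] ++ PySem.Int.toChars kv.2)) []

-- _counter: counter_dict[plus] += 1; if minus is not None: counter_dict[minus] -= 1
def pvCounter (cd : PySem.Dict Char Int) (plus : Char) (minus : Option Char) :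
    PySem.Dict Char Int × List Char :=
  let cd1 := cd.modify plus 0 (· + 1)
  let cd2 := match minus with
    | some m => cd1.modify m 0 (· - 1)
    | none => cd1
  (cd2, pvDictToStr cd2)

-- body of A's second loop (state: counter_dict, answer_dict, answer)
def pvAStep (wl : List Char) (k : Int)
    (st : PySem.Dict Char Int × PySem.Dict (List Char) Int × Int) (i : Int) :
    PySem.Dict Char Int × PySem.Dict (List Char) Int × Int :=
  let plusChar := PySem.List.pyGetD wl i 'A'
  let minusChar := PySem.List.pyGetD wl (i - k) 'A'
  let cs := pvCounter st.1 plusChar (some minusChar)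
  let count := st.2.1.getD cs.2 0 + 1
  (cs.1, (st.2.1.insert cs.2 count, max count st.2.2))

def solution (k : Int) (w : String) : Int :=
  let wl := w.toList
  let cd0 : PySem.Dict Char Int := PySem.Dict.mk [('A', 0), ('C', 0), ('G', 0), ('T', 0)]
  let cd1 := (PySem.List.pyRange 0 k 1).foldl
      (fun d i => d.modify (PySem.List.pyGetD wl i 'A') 0 (· + 1)) cd0
  let defaultStr := pvDictToStr cd1
  let ad0 := (PySem.Dict.empty : PySem.Dict (List Char) Int).insert defaultStr 1
  let fin := (PySem.List.pyRange k (PySem.Str.len w) 1).foldl (pvAStep wl k)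
      (cd1, (ad0, (1 : Int)))
  fin.2.2

-- ===== PORT B =====
-- f"A{a}C{c}G{g}T{t}" (string as List Char)
def pvSig (a c g t : Int) : List Char :=
  ['A'] ++ PySem.Int.toChars a ++ ['C'] ++ PySem.Int.toChars c ++
  ['G'] ++ PySem.Int.toChars g ++ ['T'] ++ PySem.Int.toChars t

-- body of B's prefix-building loop (state: prefix list, counts dict)
def pvPrefStep (st : List (Int × Int × Int × Int) × PySem.Dict Char Int) (ch : Char) :
    List (Int × Int × Int × Int) × PySem.Dict Char Int :=
  let d := st.2.modify ch 0 (· + 1)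
  (st.1 ++ [(d.getD 'A' 0, d.getD 'C' 0, d.getD 'G' 0, d.getD 'T' 0)], d)

-- body of B's tally loop (state: freq dict, best)
def pvBStep (pfx : List (Int × Int × Int × Int)) (k : Int)
    (st : PySem.Dict (List Char) Int × Int) (s : Int) :
    PySem.Dict (List Char) Int × Int :=
  let p := PySem.List.pyGetD pfx (s + k) (0, 0, 0, 0)
  let q := PySem.List.pyGetD pfx s (0, 0, 0, 0)
  let key := pvSig (p.1 - q.1) (p.2.1 - q.2.1) (p.2.2.1 - q.2.2.1) (p.2.2.2 - q.2.2.2)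
  let cnt := st.1.getD key 0 + 1
  (st.1.insert key cnt, max st.2 cnt)

def solution_alt (k : Int) (w : String) : Int :=
  let wl := w.toList
  let n := PySem.Str.len w
  let counts : PySem.Dict Char Int := PySem.Dict.mk [('A', 0), ('C', 0), ('G', 0), ('T', 0)]
  let pfx := (wl.foldl pvPrefStep ([(0, 0, 0, 0)], counts)).1
  let fin := (PySem.List.pyRange 0 (n - k + 1) 1).foldl (pvBStep pfx k)
      ((PySem.Dict.empty : PySem.Dict (List Char) Int), (1 : Int))
  fin.2

-- ===== PRECONDITION & SPEC =====
-- Pre_ excludes exactly the inputs where A raises: k < 0 or k > len(w) (IndexError)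
-- and strings with a character outside "ACGT" (KeyError). A returns on all other inputs.
def Pre_solution (k : Int) (w : String) : Prop :=
  0 ≤ k ∧ k ≤ (w.toList.length : Int) ∧
  w.toList.all (fun c => c == 'A' || c == 'C' || c == 'G' || c == 'T') = true
instance (k : Int) (w : String) : Decidable (Pre_solution k w) := by
  unfold Pre_solution; infer_instance

def pvWitness_solution : Int × String := (2, "ACGT")

def Spec_solution (k : Int) (w : String) (out : Int) : Prop := out = solution_alt k w
instance (k : Int) (w : String) (out : Int) : Decidable (Spec_solution k w out) := by
  unfold Spec_solution; infer_instance

-- ===== CLAIM (what is proved, stated in full; the proofs are below) =====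
def Claim_equal_solution : Prop :=
  ∀ (k : Int) (w : String), Dom_solution k w → Pre_solution k w →
    Spec_solution k w (solution k w)

-- ===== LEMMAS AND PROOFS =====

-- the literal four-key counter dict
def pvMk4 (a c g t : Int) : PySem.Dict Char Int :=
  PySem.Dict.mk [('A', a), ('C', c), ('G', g), ('T', t)]

-- Int-valued count of c among the first s characters
def pvCnt (wl : List Char) (c : Char) (s : Nat) : Int := ((wl.take s).count c : Nat)

-- count of c in the window of length kn starting at s
def pvD (wl : List Char) (kn : Nat) (c : Char) (s : Nat) : Int :=
  pvCnt wl c (s + kn) - pvCnt wl c s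

def pvDelta (p c : Char) : Int := if p = c then 1 else 0

lemma pvD_def (wl : List Char) (kn : Nat) (c : Char) (s : Nat) :
    pvD wl kn c s = pvCnt wl c (s + kn) - pvCnt wl c s := rfl

lemma pvModA (a c g t : Int) (f : Int → Int) :
    (pvMk4 a c g t).modify 'A' 0 f = pvMk4 (f a) c g t := rfl
lemma pvModC (a c g t : Int) (f : Int → Int) :
    (pvMk4 a c g t).modify 'C' 0 f = pvMk4 a (f c) g t := rfl
lemma pvModG (a c g t : Int) (f : Int → Int) :
    (pvMk4 a c g t).modify 'G' 0 f = pvMk4 a c (f g) t := rfl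
lemma pvModT (a c g t : Int) (f : Int → Int) :
    (pvMk4 a c g t).modify 'T' 0 f = pvMk4 a c g (f t) := rfl

lemma pvGetA (a c g t : Int) : (pvMk4 a c g t).getD 'A' 0 = a := rfl
lemma pvGetC (a c g t : Int) : (pvMk4 a c g t).getD 'C' 0 = c := rfl
lemma pvGetG (a c g t : Int) : (pvMk4 a c g t).getD 'G' 0 = g := rfl
lemma pvGetT (a c g t : Int) : (pvMk4 a c g t).getD 'T' 0 = t := rfl

lemma pvDictToStr_mk4 (a c g t : Int) : pvDictToStr (pvMk4 a c g t) = pvSig a c g t := by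
  simp [pvDictToStr, pvMk4, pvSig]

lemma pvPrefStep_eq (acc : List (Int × Int × Int × Int)) (a c g t : Int) (ch : Char)
    (h : ch = 'A' ∨ ch = 'C' ∨ ch = 'G' ∨ ch = 'T') :
    pvPrefStep (acc, pvMk4 a c g t) ch
      = (acc ++ [(a + pvDelta ch 'A', c + pvDelta ch 'C', g + pvDelta ch 'G', t + pvDelta ch 'T')],
         pvMk4 (a + pvDelta ch 'A') (c + pvDelta ch 'C') (g + pvDelta ch 'G') (t + pvDelta ch 'T')) := by
  rcases h with rfl | rfl | rfl | rfl <;>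
    simp only [pvPrefStep, pvModA, pvModC, pvModG, pvModT, pvGetA, pvGetC, pvGetG, pvGetT] <;>
    simp [pvDelta]

lemma pvPref_aux (u : List Char) :
    (∀ ch ∈ u, ch = 'A' ∨ ch = 'C' ∨ ch = 'G' ∨ ch = 'T') →
    ∀ (acc : List (Int × Int × Int × Int)) (a c g t : Int),
    (u.foldl pvPrefStep (acc, pvMk4 a c g t)).1
      = acc ++ (List.range u.length).map (fun i =>
          (a + pvCnt u 'A' (i + 1), c + pvCnt u 'C' (i + 1),
           g + pvCnt u 'G' (i + 1), t + pvCnt u 'T' (i + 1))) := by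
  induction u with
  | nil => intro _ acc a c g t; simp
  | cons ch u' ih =>
    intro hu acc a c g t
    have hu' : ∀ x ∈ u', x = 'A' ∨ x = 'C' ∨ x = 'G' ∨ x = 'T' :=
      fun x hx => hu x (List.mem_cons_of_mem _ hx)
    have hcnt : ∀ (x : Char) (i : Nat),
        pvCnt (ch :: u') x (i + 1) = pvDelta ch x + pvCnt u' x i := by
      intro x i
      rcases eq_or_ne ch x with h | h
      · subst h
        simp [pvCnt, pvDelta, List.take_succ_cons]
        ring
      · simp [pvCnt, pvDelta, List.take_succ_cons, h]
    simp only [List.foldl_cons, pvPrefStep_eq _ _ _ _ _ _ (hu ch List.mem_cons_self)]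
    rw [ih hu']
    rw [List.length_cons, List.range_succ_eq_map]
    simp only [List.map_cons, List.map_map, List.append_assoc, List.singleton_append]
    have h1 : ∀ x : Char, pvCnt (ch :: u') x 1 = pvDelta ch x := by
      intro x
      have h0 := hcnt x 0
      simpa [pvCnt] using h0
    congr 1
    congr 1
    · simp [h1]
    · apply List.map_congr_left
      intro i _
      simp [Function.comp, hcnt, add_assoc]

lemma pvPref_get (wl : List Char) (hch : ∀ ch ∈ wl, ch = 'A' ∨ ch = 'C' ∨ ch = 'G' ∨ ch = 'T')
    (s : Nat) (hs : s ≤ wl.length) :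
    PySem.List.pyGetD ((wl.foldl pvPrefStep ([(0, 0, 0, 0)], pvMk4 0 0 0 0)).1) (s : Int) (0, 0, 0, 0)
      = (pvCnt wl 'A' s, pvCnt wl 'C' s, pvCnt wl 'G' s, pvCnt wl 'T' s) := by
  rw [pvPref_aux wl hch]
  rw [PySem.List.pyGetD_natCast]
  simp only [List.singleton_append]
  cases s with
  | zero => simp [pvCnt]
  | succ s' =>
    have hs' : s' < wl.length := by omega
    simp [List.getD_eq_getElem?_getD, hs']

lemma pvMod4 (u : List Char) :
    (∀ ch ∈ u, ch = 'A' ∨ ch = 'C' ∨ ch = 'G' ∨ ch = 'T') →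
    ∀ (a c g t : Int),
    (u.foldl (fun d ch => d.modify ch 0 (· + 1)) (pvMk4 a c g t))
      = pvMk4 (a + (u.count 'A' : Nat)) (c + (u.count 'C' : Nat))
              (g + (u.count 'G' : Nat)) (t + (u.count 'T' : Nat)) := by
  induction u with
  | nil => intro _ a c g t; simp
  | cons ch u' ih =>
    intro hu a c g t
    have hu' : ∀ x ∈ u', x = 'A' ∨ x = 'C' ∨ x = 'G' ∨ x = 'T' :=
      fun x hx => hu x (List.mem_cons_of_mem _ hx)
    have hch := hu ch List.mem_cons_self
    rcases hch with rfl | rfl | rfl | rfl <;>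
      simp only [List.foldl_cons, pvModA, pvModC, pvModG, pvModT] <;>
      rw [ih hu'] <;>
      simp [pvMk4] <;>
      omega

lemma pvRangeTake (wl : List Char) (kn : Nat) (hk : kn ≤ wl.length)
    (init : PySem.Dict Char Int) :
    (PySem.List.pyRange 0 (kn : Int) 1).foldl
        (fun d i => d.modify (PySem.List.pyGetD wl i 'A') 0 (· + 1)) init
      = (wl.take kn).foldl (fun d ch => d.modify ch 0 (· + 1)) init := by
  induction kn with
  | zero => simp [PySem.List.pyRange_one_eq_nil]
  | succ m ih =>
    have hm : m < wl.length := by omega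
    have h1 : ((m + 1 : Nat) : Int) = (m : Int) + 1 := by omega
    rw [h1, PySem.List.pyRange_one_succ_right (by positivity)]
    rw [List.foldl_append, ih (by omega)]
    rw [List.take_add_one, List.getElem?_eq_getElem hm]
    rw [List.foldl_append]
    simp [PySem.List.pyGetD_natCast, List.getD_eq_getElem?_getD, List.getElem?_eq_getElem hm]

lemma pvCounter_mk4 (a c g t : Int) (p q : Char)
    (hp : p = 'A' ∨ p = 'C' ∨ p = 'G' ∨ p = 'T')
    (hq : q = 'A' ∨ q = 'C' ∨ q = 'G' ∨ q = 'T') :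
    pvCounter (pvMk4 a c g t) p (some q)
      = (pvMk4 (a + pvDelta p 'A' - pvDelta q 'A') (c + pvDelta p 'C' - pvDelta q 'C')
               (g + pvDelta p 'G' - pvDelta q 'G') (t + pvDelta p 'T' - pvDelta q 'T'),
         pvSig (a + pvDelta p 'A' - pvDelta q 'A') (c + pvDelta p 'C' - pvDelta q 'C')
               (g + pvDelta p 'G' - pvDelta q 'G') (t + pvDelta p 'T' - pvDelta q 'T')) := by
  rcases hp with rfl | rfl | rfl | rfl <;> rcases hq with rfl | rfl | rfl | rfl <;>
    simp [pvCounter, pvModA, pvModC, pvModG, pvModT, pvDictToStr_mk4, pvDelta]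

lemma pvCnt_succ (wl : List Char) (c : Char) (s : Nat) (hs : s < wl.length) :
    pvCnt wl c (s + 1) = pvCnt wl c s + pvDelta wl[s] c := by
  unfold pvCnt pvDelta
  rw [List.take_add_one, List.getElem?_eq_getElem hs, Option.toList_some, List.count_append,
      List.count_cons, List.count_nil]
  rcases eq_or_ne wl[s] c with h | h
  · subst h; simp
  · simp [h]

lemma pvD_succ (wl : List Char) (kn : Nat) (c : Char) (s : Nat)
    (h1 : s + kn < wl.length) (h2 : s < wl.length) :
    pvD wl kn c (s + 1) = pvD wl kn c s + pvDelta wl[s + kn] c - pvDelta wl[s] c := by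
  unfold pvD
  rw [show s + 1 + kn = (s + kn) + 1 by omega]
  rw [pvCnt_succ _ _ _ h1, pvCnt_succ _ _ _ h2]
  ring

lemma pvLoop (wl : List Char) (kn : Nat) (hk : kn ≤ wl.length)
    (hch : ∀ c ∈ wl, c = 'A' ∨ c = 'C' ∨ c = 'G' ∨ c = 'T') :
    ∀ (q t : Nat), t + q = wl.length - kn →
    ∀ (ad : PySem.Dict (List Char) Int) (ans : Int),
      ((PySem.List.pyRange ((kn : Int) + (t : Int)) (wl.length : Int) 1).foldl
          (pvAStep wl (kn : Int))
          (pvMk4 (pvD wl kn 'A' t) (pvD wl kn 'C' t) (pvD wl kn 'G' t) (pvD wl kn 'T' t),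
           (ad, ans))).2.2
      = ((PySem.List.pyRange ((t : Int) + 1) ((wl.length : Int) - (kn : Int) + 1) 1).foldl
          (pvBStep ((wl.foldl pvPrefStep ([(0, 0, 0, 0)], pvMk4 0 0 0 0)).1) (kn : Int))
          (ad, ans)).2 := by
  intro q
  induction q with
  | zero =>
    intro t ht ad ans
    rw [PySem.List.pyRange_one_eq_nil (by omega), PySem.List.pyRange_one_eq_nil (by omega)]
    rfl
  | succ q' ih =>
    intro t ht ad ans
    have htk : t + kn < wl.length := by omega
    have htl : t < wl.length := by omega
    have htk1 : t + 1 + kn ≤ wl.length := by omega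
    have htl1 : t + 1 ≤ wl.length := by omega
    rw [PySem.List.pyRange_one_cons (by omega : (kn : Int) + (t : Int) < (wl.length : Int))]
    rw [PySem.List.pyRange_one_cons
      (by omega : (t : Int) + 1 < (wl.length : Int) - (kn : Int) + 1)]
    simp only [List.foldl_cons]
    -- A's step
    have hplus : PySem.List.pyGetD wl ((kn : Int) + (t : Int)) 'A' = wl[t + kn]'htk := by
      rw [show (kn : Int) + (t : Int) = ((t + kn : Nat) : Int) by push_cast; ring]
      rw [PySem.List.pyGetD_natCast]
      simp [List.getD_eq_getElem?_getD, List.getElem?_eq_getElem htk]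
    have hminus : PySem.List.pyGetD wl ((kn : Int) + (t : Int) - (kn : Int)) 'A'
        = wl[t]'htl := by
      rw [show (kn : Int) + (t : Int) - (kn : Int) = ((t : Nat) : Int) by ring]
      rw [PySem.List.pyGetD_natCast]
      simp [List.getD_eq_getElem?_getD, List.getElem?_eq_getElem htl]
    simp only [pvAStep, hplus, hminus]
    rw [pvCounter_mk4 _ _ _ _ _ _
      (hch _ (List.getElem_mem htk)) (hch _ (List.getElem_mem htl))]
    rw [← pvD_succ wl kn 'A' t htk htl, ← pvD_succ wl kn 'C' t htk htl,
        ← pvD_succ wl kn 'G' t htk htl, ← pvD_succ wl kn 'T' t htk htl]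
    -- B's step
    simp only [pvBStep]
    rw [show ((t : Int) + 1) + (kn : Int) = ((t + 1 + kn : Nat) : Int) by push_cast; ring]
    rw [show ((t : Int) + 1) = ((t + 1 : Nat) : Int) by push_cast; ring]
    rw [pvPref_get wl hch (t + 1 + kn) htk1, pvPref_get wl hch (t + 1) htl1]
    simp only
    rw [← pvD_def wl kn 'A' (t + 1), ← pvD_def wl kn 'C' (t + 1),
        ← pvD_def wl kn 'G' (t + 1), ← pvD_def wl kn 'T' (t + 1)]
    rw [max_comm ans]
    rw [show (kn : Int) + (t : Int) + 1 = (kn : Int) + ((t + 1 : Nat) : Int) by push_cast; ring]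
    rw [show ((t + 1 : Nat) : Int) + 1 = ((t + 1 : Nat) : Int) + 1 from rfl]
    exact ih (t + 1) (by omega) _ _

-- ===== VERDICT (by name: the statement is the Claim_ definition above) =====
theorem solution_spec : Claim_equal_solution := by
  unfold Claim_equal_solution
  intro k w hdom hpre
  obtain ⟨hk0, hkle, hall⟩ := hpre
  have hch : ∀ c ∈ w.toList, c = 'A' ∨ c = 'C' ∨ c = 'G' ∨ c = 'T' := by
    intro c hc
    rw [List.all_eq_true] at hall
    have h4 := hall c hc
    simp at h4
    tauto
  obtain ⟨kn, rfl⟩ : ∃ kn : Nat, k = (kn : Int) := ⟨k.toNat, by omega⟩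
  unfold Spec_solution
  simp only [solution, solution_alt]
  have hlen : PySem.Str.len w = ((w.toList.length : Nat) : Int) := by simp [pysem]
  rw [hlen]
  set wl := w.toList with hwl
  have hkn : kn ≤ wl.length := by omega
  rw [pvRangeTake wl kn hkn]
  rw [show (PySem.Dict.mk [('A', (0 : Int)), ('C', 0), ('G', 0), ('T', 0)])
      = pvMk4 0 0 0 0 from rfl]
  rw [pvMod4 (wl.take kn) (fun x hx => hch x (List.mem_of_mem_take hx)) 0 0 0 0]
  simp only [zero_add]
  have h0 : ∀ c : Char, (((wl.take kn).count c : Nat) : Int) = pvD wl kn c 0 := by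
    intro c; simp [pvD, pvCnt]
  rw [h0 'A', h0 'C', h0 'G', h0 'T']
  rw [pvDictToStr_mk4]
  -- B's side: peel the first window (s = 0)
  rw [PySem.List.pyRange_one_cons (by omega : (0 : Int) < (wl.length : Int) - (kn : Int) + 1)]
  simp only [List.foldl_cons, pvBStep]
  rw [show (0 : Int) + (kn : Int) = ((kn : Nat) : Int) from by ring]
  rw [pvPref_get wl hch kn hkn]
  have hq0 := pvPref_get wl hch 0 (by omega)
  simp only [Nat.cast_zero] at hq0
  rw [hq0]
  simp only
  have h0' : ∀ c : Char, pvCnt wl c kn - pvCnt wl c 0 = pvD wl kn c 0 := by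
    intro c; simp [pvD, pvCnt]
  rw [h0' 'A', h0' 'C', h0' 'G', h0' 'T']
  rw [show (PySem.Dict.empty : PySem.Dict (List Char) Int).getD
        (pvSig (pvD wl kn 'A' 0) (pvD wl kn 'C' 0) (pvD wl kn 'G' 0) (pvD wl kn 'T' 0)) 0
      = 0 from PySem.Dict.getD_empty _ _]
  norm_num
  have H := pvLoop wl kn hkn hch (wl.length - kn) 0 (by omega)
    ((PySem.Dict.empty : PySem.Dict (List Char) Int).insert
      (pvSig (pvD wl kn 'A' 0) (pvD wl kn 'C' 0) (pvD wl kn 'G' 0) (pvD wl kn 'T' 0)) 1) 1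
  simp only [Nat.cast_zero, add_zero, zero_add] at H
  exact H
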